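-- pv_equiv track=rewrite | github.com/autogluon/autogluon | features/src/autogluon/features/generators/arithmetic/combinations.py | _expr_to_canonical_key
-- ===== SOURCE A (Python) =====
-- from typing import Dict, Hashable, Iterable, List, Tuple
--
-- _PAREN_TRANS = str.maketrans("", "", "()")
--
-- def _expr_to_canonical_key(expr: str) -> Tuple:
--     """
--     Convert an interaction expression like 'A_/_B_*_C' or '(A_*_B)_-_C'
--     into a hashable canonical key that is invariant to:
--
--     - Commutativity of * and +
--     - Associativity of * and +
--     - Interaction of * and / (e.g. (A/B)*C == (C*A)/B)
--     - Superfluous parentheses introduced by the generator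
--
--     The expression format is assumed to be:
--         var op var op var ...
--     with '_' separating tokens, and optional parentheses.
--     """
--     # Remove parentheses and split by the '_' tokens
--     tokens = expr.translate(_PAREN_TRANS).split("_")
--     if not tokens:
--         return ()
--
--     # Each monomial is represented by:
--     #   frozenset({var: exponent, ...}.items()) -> coefficient (int)
--     # The overall expression is a sum of such monomials.
--     monoms: Dict[frozenset, int] = {frozenset({tokens[0]: 1}.items()): 1}
--
--     # Process operator / variable pairs: (op, var), (op, var), ...
--     # tokens = [v0, op1, v1, op2, v2, ...]
--     it = iter(tokens[1:])
--     for op, var in zip(it, it):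
--         if op in ("*", "/"):
--             # Scale EVERY monomial by *var or /var
--             delta = 1 if op == "*" else -1
--             new_monoms: Dict[frozenset, int] = {}
--             for exp_fs, coeff in monoms.items():
--                 exp_dict = dict(exp_fs)
--                 exp_dict[var] = exp_dict.get(var, 0) + delta
--                 if exp_dict[var] == 0:
--                     del exp_dict[var]
--
--                 key = frozenset(exp_dict.items())
--                 new_monoms[key] = new_monoms.get(key, 0) + coeff
--             monoms = new_monoms
--
--         elif op in ("+", "-"):
--             # Add a new monomial ± var (does NOT touch previous monoms)
--             sign = 1 if op == "+" else -1
--             key = frozenset({var: 1}.items())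
--             monoms[key] = monoms.get(key, 0) + sign
--
--         else:
--             raise ValueError(f"Unknown operator {op!r} in expression {expr!r}")
--
--     # Build a canonical, hashable representation:
--     #   key = tuple(sorted( (coeff, tuple(sorted((var, exp), ...))) ))
--     canonical_items: List[Tuple[int, Tuple[Tuple[str, int], ...]]] = []
--     for exp_fs, coeff in monoms.items():
--         if coeff == 0:
--             continue
--         vars_exps = tuple(sorted(exp_fs))  # (var, exponent)
--         canonical_items.append((coeff, vars_exps))
--
--     canonical_items.sort()
--     return tuple(canonical_items)
-- ===== SOURCE B (Python) =====
-- def _expr_to_canonical_key(expr: str):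
--     # Right-to-left single pass: a running 'suffix' exponent map accumulates the
--     # multiplicative ops seen so far (moving leftward); every additive term is a
--     # monomial = its var merged into the current suffix.
--     tokens = expr.translate(str.maketrans("", "", "()")).split("_")
--     pairs = list(zip(tokens[1::2], tokens[2::2]))
--     for op, _ in pairs:
--         if op not in ("*", "/", "+", "-"):
--             raise ValueError(f"Unknown operator {op!r} in expression {expr!r}")
--
--     suffix = {}   # var -> exponent contributed by ops to the right
--     result = {}   # frozenset(exponent items) -> coefficient
--
--     def bump(d, var, delta):
--         v = d.get(var, 0) + delta
--         if v == 0: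
--             d.pop(var, None)
--         else:
--             d[var] = v
--
--     def add_term(var, sign):
--         e = dict(suffix)
--         bump(e, var, 1)
--         k = frozenset(e.items())
--         result[k] = result.get(k, 0) + sign
--
--     for op, var in reversed(pairs):
--         if op == "*":
--             bump(suffix, var, 1)
--         elif op == "/":
--             bump(suffix, var, -1)
--         else:
--             add_term(var, 1 if op == "+" else -1)
--     add_term(tokens[0], 1)
--
--     return tuple(sorted((c, tuple(sorted(k))) for k, c in result.items() if c != 0))
-- ===== Notes on version B (the rewrite author's own statement) =====
-- stated objective: alternative
-- what changed: B replaces A's forward pass that rescales every stored monomial at each '*'/'/' operator by a single right-to-left pass that accumulates a suffix exponent map and emits each additive term's monomial once, after validating all operators up front.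
import Mathlib
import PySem

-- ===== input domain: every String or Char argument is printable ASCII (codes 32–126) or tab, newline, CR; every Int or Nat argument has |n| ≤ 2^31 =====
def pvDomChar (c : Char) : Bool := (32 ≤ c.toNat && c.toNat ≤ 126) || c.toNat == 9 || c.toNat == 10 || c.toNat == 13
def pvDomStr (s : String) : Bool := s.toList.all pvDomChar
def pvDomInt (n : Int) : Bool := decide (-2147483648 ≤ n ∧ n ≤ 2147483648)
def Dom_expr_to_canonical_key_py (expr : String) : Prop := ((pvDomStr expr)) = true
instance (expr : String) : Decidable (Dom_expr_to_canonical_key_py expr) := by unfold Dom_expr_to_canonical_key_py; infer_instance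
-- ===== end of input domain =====

-- B re-implements the canonicalization in one right-to-left pass with a running suffix-exponent
-- map instead of A's rescaling of every monomial at each '*'/'/' (objective: alternative).

-- ===== PORT A =====
-- Python sort key of a (var, exponent) tuple: lexicographic pair of code-point string order and Int
-- (Python's tuple/str comparison; exact — see PYSEM 'str COMPARISON').
def pvPairKey (p : String × Int) : List Char ×ₗ Int := toLex (p.1.toList, p.2)

-- Python sort key of a (coeff, ((var, exp), ...)) item: lexicographic (Int, tuple-of-tuples).
def pvItemKey (it : Int × List (String × Int)) : Int ×ₗ List (List Char ×ₗ Int) :=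
  toLex (it.1, it.2.map pvPairKey)

-- expr.translate(_PAREN_TRANS) deletes '(' and ')' (hand-ported, exact), then .split("_")
-- (split? is none only for an empty separator).
def pvTokens (expr : String) : List String :=
  (PySem.Str.split? (String.ofList (expr.toList.filter (fun c => !(c == '(' || c == ')')))) "_").getD []

-- zip(it, it) over tokens[1:]: consecutive disjoint (op, var) pairs; a trailing odd token is dropped.
def pvPairUp : List String → List (String × String)
  | a :: b :: rest => (a, b) :: pvPairUp rest
  | _ => []

-- A frozenset of (var, exponent) items is modeled canonically as the Python-sorted list of its
-- items (exact: frozensets compare by content and are only observed via == / dict keys / sorted()).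
def pvCanon (d : PySem.Dict String Int) : List (String × Int) :=
  PySem.List.sorted d.items pvPairKey

-- exp_dict[var] = exp_dict.get(var, 0) + delta; if exp_dict[var] == 0: del exp_dict[var]
def pvBump (d : PySem.Dict String Int) (var : String) (delta : Int) : PySem.Dict String Int :=
  let v := d.getD var 0 + delta
  if v = 0 then d.erase var else d.insert var v

-- one iteration of A's 'for op, var in zip(it, it)' loop body
def pvStepA (monoms : PySem.Dict (List (String × Int)) Int) (pr : String × String) :
    PySem.Dict (List (String × Int)) Int :=
  if pr.1 = "*" ∨ pr.1 = "/" then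
    let delta : Int := if pr.1 = "*" then 1 else -1
    monoms.items.foldl (fun newm p =>
      let key := pvCanon (pvBump (PySem.Dict.ofList p.1) pr.2 delta)
      newm.insert key (newm.getD key 0 + p.2)) PySem.Dict.empty
  else if pr.1 = "+" ∨ pr.1 = "-" then
    let sign : Int := if pr.1 = "+" then 1 else -1
    let key : List (String × Int) := [(pr.2, 1)]   -- frozenset({var: 1}.items())
    monoms.insert key (monoms.getD key 0 + sign)
  else
    monoms   -- Python raises ValueError here; such inputs are excluded by Pre_

def expr_to_canonical_key_py (expr : String) : List (Int × (List (String × Int))) :=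
  match pvTokens expr with
  | [] => []     -- 'if not tokens: return ()' (unreachable: split("_") is never empty)
  | t0 :: rest =>
    let init : PySem.Dict (List (String × Int)) Int := PySem.Dict.ofList [([(t0, (1 : Int))], (1 : Int))]
    let monoms := (pvPairUp rest).foldl pvStepA init
    let canonical := monoms.items.foldl (fun acc p =>
      if p.2 = 0 then acc else acc ++ [(p.2, PySem.List.sorted p.1 pvPairKey)]) []
    PySem.List.sorted canonical pvItemKey

-- ===== PORT B =====
-- e = dict(suffix); bump(e, var, 1); result[frozenset(e.items())] += sign
def pvAddTerm (suffix : PySem.Dict String Int) (result : PySem.Dict (List (String × Int)) Int)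
    (var : String) (sign : Int) : PySem.Dict (List (String × Int)) Int :=
  let k := pvCanon (pvBump suffix var 1)
  result.insert k (result.getD k 0 + sign)

-- one iteration of Source B's 'for op, var in reversed(pairs)' loop body
-- (the final else covers '+'/'-': any other op already raised in the validation pass, outside Pre_)
def pvStepB (st : PySem.Dict String Int × PySem.Dict (List (String × Int)) Int)
    (pr : String × String) : PySem.Dict String Int × PySem.Dict (List (String × Int)) Int :=
  if pr.1 = "*" then (pvBump st.1 pr.2 1, st.2)
  else if pr.1 = "/" then (pvBump st.1 pr.2 (-1), st.2)
  else (st.1, pvAddTerm st.1 st.2 pr.2 (if pr.1 = "+" then 1 else -1))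

def expr_to_canonical_key_py_alt (expr : String) : List (Int × (List (String × Int))) :=
  match pvTokens expr with
  | [] => []   -- unreachable: split("_") always yields at least one token
  | t0 :: rest =>
    let pairs := pvPairUp rest   -- zip(tokens[1::2], tokens[2::2])
    let st := pairs.reverse.foldl pvStepB (PySem.Dict.empty, PySem.Dict.empty)
    let result := pvAddTerm st.1 st.2 t0 1
    PySem.List.sorted ((result.items.filter (fun p => !(p.2 == 0))).map
      (fun p => (p.2, PySem.List.sorted p.1 pvPairKey))) pvItemKey

-- ===== PRECONDITION & SPEC =====
-- Pre_ excludes exactly the inputs on which A raises ValueError: an odd-position token that is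
-- followed by its operand but is not one of '*', '/', '+', '-'.
def Pre_expr_to_canonical_key_py (expr : String) : Prop :=
  ∀ i < (pvTokens expr).length, 2 * i + 2 < (pvTokens expr).length →
    ((pvTokens expr)[2 * i + 1]! = "*" ∨ (pvTokens expr)[2 * i + 1]! = "/" ∨
     (pvTokens expr)[2 * i + 1]! = "+" ∨ (pvTokens expr)[2 * i + 1]! = "-")
instance (expr : String) : Decidable (Pre_expr_to_canonical_key_py expr) := by
  unfold Pre_expr_to_canonical_key_py; infer_instance

def pvWitness_expr_to_canonical_key_py : String := "(A_*_B)_-_C_/_A"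

def Spec_expr_to_canonical_key_py (expr : String) (out : List (Int × (List (String × Int)))) : Prop := out = expr_to_canonical_key_py_alt expr
instance (expr : String) (out : List (Int × (List (String × Int)))) : Decidable (Spec_expr_to_canonical_key_py expr out) := by unfold Spec_expr_to_canonical_key_py; infer_instance

-- ===== CLAIM (what is proved, stated in full; the proofs are below) =====
def Claim_equal_expr_to_canonical_key_py : Prop := ∀ (expr : String), Dom_expr_to_canonical_key_py expr → Pre_expr_to_canonical_key_py expr → Spec_expr_to_canonical_key_py expr (expr_to_canonical_key_py expr)

-- ===== LEMMAS AND PROOFS =====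

-- abbreviations for the proof layer
def pvGood (d : PySem.Dict String Int) : Prop :=
  d.keys.Nodup ∧ ∀ p ∈ d.items, p.2 ≠ 0

def pvCanonKey (k : List (String × Int)) : Prop :=
  (k.map Prod.fst).Nodup ∧ (∀ p ∈ k, p.2 ≠ 0) ∧ PySem.List.sorted k pvPairKey = k

-- suffix/result state of B after the (right-to-left) loop over P
def pvStateB (P : List (String × String)) :
    PySem.Dict String Int × PySem.Dict (List (String × Int)) Int :=
  P.foldr (fun pr st => pvStepB st pr) (PySem.Dict.empty, PySem.Dict.empty)

-- merge a suffix map into an exponent dict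
def pvMerge (d s : PySem.Dict String Int) : PySem.Dict String Int :=
  s.items.foldl (fun d p => pvBump d p.1 p.2) d

-- the canonical key a monomial key k is carried to by the multiplicative ops of P
def pvPush (k : List (String × Int)) (P : List (String × String)) : List (String × Int) :=
  pvCanon (pvMerge (PySem.Dict.ofList k) (pvStateB P).1)

-- weighted sum of an association list's values
def pvWsum {κ : Type} (c : κ → Int) (l : List (κ × Int)) : Int :=
  (l.map (fun p => c p.1 * p.2)).sum

-- injectivity of the Python sort keys
theorem pvPairKey_inj : Function.Injective pvPairKey := by
  intro p q h
  simp only [pvPairKey] at h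
  have h' : (p.1.toList, p.2) = (q.1.toList, q.2) := congrArg ofLex h
  have h1 : p.1.toList = q.1.toList := (Prod.ext_iff.mp h').1
  have h2 : p.2 = q.2 := (Prod.ext_iff.mp h').2
  exact Prod.ext (by simpa using congrArg String.ofList h1) h2

theorem pvItemKey_inj : Function.Injective pvItemKey := by
  intro p q h
  simp only [pvItemKey] at h
  have h' : (p.1, p.2.map pvPairKey) = (q.1, q.2.map pvPairKey) := congrArg ofLex h
  have h1 : p.1 = q.1 := (Prod.ext_iff.mp h').1
  have h2 : p.2.map pvPairKey = q.2.map pvPairKey := (Prod.ext_iff.mp h').2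
  exact Prod.ext h1 (List.map_injective_iff.mpr pvPairKey_inj h2)

-- lookup after erase
theorem pvGet?_erase_self (d : PySem.Dict String Int) (k : String) :
    (d.erase k).get? k = none := by
  simp only [PySem.Dict.erase, PySem.Dict.get?, Option.map_eq_none_iff, List.find?_eq_none,
    List.mem_filter]
  intro p hp
  simpa using hp.2

theorem pvGet?_erase_of_ne (d : PySem.Dict String Int) (k x : String) (h : x ≠ k) :
    (d.erase k).get? x = d.get? x := by
  simp only [PySem.Dict.erase, PySem.Dict.get?]
  congr 1
  induction d.items with
  | nil => rfl
  | cons a l ih =>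
    by_cases hak : a.1 = k
    · simp [hak, Ne.symm h, ih]
    · by_cases hax : a.1 = x
      · simp [hax, h]
      · simp [hak, hax, ih]

theorem pvBump_getD (d : PySem.Dict String Int) (var : String) (δ : Int) (x : String) :
    (pvBump d var δ).getD x 0 = d.getD x 0 + (if x = var then δ else 0) := by
  unfold pvBump
  by_cases h0 : d.getD var 0 + δ = 0
  · simp only [h0, if_true]
    by_cases hx : x = var
    · subst hx
      simp only [PySem.Dict.getD] at h0 ⊢
      simp only [pvGet?_erase_self]
      simp
      omega
    · simp [PySem.Dict.getD, pvGet?_erase_of_ne d var x hx, hx]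
  · simp only [h0, if_false]
    by_cases hx : x = var
    · subst hx; simp
    · simp [PySem.Dict.getD_insert, hx]

theorem pvGood_bump (d : PySem.Dict String Int) (var : String) (δ : Int) (h : pvGood d) :
    pvGood (pvBump d var δ) := by
  obtain ⟨hn, hv⟩ := h
  unfold pvBump
  by_cases h0 : d.getD var 0 + δ = 0
  · simp only [h0, if_true]
    constructor
    · exact ((List.filter_sublist ..).map Prod.fst).nodup hn
    · intro p hp
      exact hv p (List.mem_of_mem_filter hp)
  · simp only [h0, if_false]
    refine ⟨PySem.Dict.nodup_keys_insert _ _ _ hn, ?_⟩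
    intro p hp
    rcases (PySem.Dict.mem_items_insert _ _ _ _).mp hp with h1 | h1
    · subst h1; exact h0
    · exact hv p h1.1

-- lookup is determined by the item multiset when keys are unique
theorem pvGet?_eq_of_perm {ν : Type} [DecidableEq ν] (d d' : PySem.Dict String ν)
    (hp : d.items.Perm d'.items) (hn : d.keys.Nodup) (hn' : d'.keys.Nodup) (x : String) :
    d.get? x = d'.get? x := by
  cases h : d'.get? x with
  | none =>
    rw [PySem.Dict.get?_eq_none_iff_not_mem_keys] at h ⊢
    intro hm
    exact h (by simpa [PySem.Dict.keys] using (hp.map Prod.fst).mem_iff.mp (by simpa [PySem.Dict.keys] using hm))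
  | some v =>
    rw [PySem.Dict.get?_eq_some_iff_mem_items _ _ _ hn'] at h
    exact (PySem.Dict.get?_eq_some_iff_mem_items _ _ _ hn).mpr (hp.mem_iff.mpr h)

-- canonical keys
theorem pvCanon_perm (d : PySem.Dict String Int) : (pvCanon d).Perm d.items :=
  PySem.List.sorted_perm _ _ _

theorem pvCanonKey_of_good (d : PySem.Dict String Int) (h : pvGood d) :
    pvCanonKey (pvCanon d) := by
  obtain ⟨hn, hv⟩ := h
  refine ⟨((pvCanon_perm d).map Prod.fst).nodup_iff.mpr hn, ?_, ?_⟩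
  · intro p hp
    exact hv p ((pvCanon_perm d).mem_iff.mp hp)
  · exact PySem.List.sorted_sorted _ _

theorem pvOfList_items {κ ν : Type} [BEq κ] [LawfulBEq κ] (k : List (κ × ν))
    (hn : (k.map Prod.fst).Nodup) : (PySem.Dict.ofList k).items = k := by
  have := PySem.Dict.items_foldl_insert_fresh (κ := κ) (ν := ν) k Prod.fst Prod.snd
    PySem.Dict.empty (by intro a _; simp [PySem.Dict.contains, PySem.Dict.empty]) hn
  simpa [PySem.Dict.ofList, PySem.Dict.update] using this

theorem pvMem_items_iff (d : PySem.Dict String Int) (h : pvGood d) (p : String × Int) :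
    p ∈ d.items ↔ d.getD p.1 0 = p.2 ∧ p.2 ≠ 0 := by
  obtain ⟨hn, hv⟩ := h
  constructor
  · intro hp
    have := (PySem.Dict.get?_eq_some_iff_mem_items _ _ _ hn).mpr hp
    exact ⟨by simp [PySem.Dict.getD, this], hv p hp⟩
  · rintro ⟨hg, hz⟩
    cases hq : d.get? p.1 with
    | none => simp [PySem.Dict.getD, hq] at hg; exact absurd hg.symm hz
    | some w =>
      have hw : w = p.2 := by simpa [PySem.Dict.getD, hq] using hg
      subst hw
      exact (PySem.Dict.get?_eq_some_iff_mem_items _ _ _ hn).mp hq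

-- two well-formed exponent dicts with the same lookup function have the same canonical key
theorem pvCanon_congr (d d' : PySem.Dict String Int) (h : pvGood d) (h' : pvGood d')
    (he : ∀ x, d.getD x 0 = d'.getD x 0) : pvCanon d = pvCanon d' := by
  have hnd : d.items.Nodup := h.1.of_map
  have hnd' : d'.items.Nodup := h'.1.of_map
  have hperm : d.items.Perm d'.items := by
    rw [List.perm_ext_iff_of_nodup hnd hnd']
    intro p
    rw [pvMem_items_iff d h p, pvMem_items_iff d' h' p, he p.1]
  exact PySem.List.sorted_eq_sorted_of_perm _ _ _ pvPairKey_inj hperm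

theorem pvGood_ofList_canon (d : PySem.Dict String Int) (h : pvGood d) :
    pvGood (PySem.Dict.ofList (pvCanon d)) := by
  have hck := pvCanonKey_of_good d h
  have hit := pvOfList_items (pvCanon d) hck.1
  refine ⟨by simpa [PySem.Dict.keys, hit] using hck.1, ?_⟩
  intro p hp
  rw [hit] at hp
  exact hck.2.1 p hp

theorem pvGetD_ofList_canon (d : PySem.Dict String Int) (h : pvGood d) (x : String) :
    (PySem.Dict.ofList (pvCanon d)).getD x 0 = d.getD x 0 := by
  have hck := pvCanonKey_of_good d h
  have hit : (PySem.Dict.ofList (pvCanon d)).items = pvCanon d := pvOfList_items _ hck.1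
  have hperm : (PySem.Dict.ofList (pvCanon d)).items.Perm d.items := by
    rw [hit]; exact pvCanon_perm d
  have hn' : (PySem.Dict.ofList (pvCanon d)).keys.Nodup := by
    simpa [PySem.Dict.keys, hit] using hck.1
  simp [PySem.Dict.getD, pvGet?_eq_of_perm _ _ hperm hn' h.1 x]

theorem pvGood_ofList_of_canonKey (k : List (String × Int)) (h : pvCanonKey k) :
    pvGood (PySem.Dict.ofList k) := by
  have hit := pvOfList_items k h.1
  exact ⟨by simpa [PySem.Dict.keys, hit] using h.1, by rw [hit]; exact h.2.1⟩

theorem pvCanon_ofList_of_canonKey (k : List (String × Int)) (h : pvCanonKey k) :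
    pvCanon (PySem.Dict.ofList k) = k := by
  unfold pvCanon
  rw [pvOfList_items k h.1]
  exact h.2.2

-- merging: lookups add, well-formedness is preserved
theorem pvFold_bump_getD (l : List (String × Int)) (d : PySem.Dict String Int) (x : String) :
    (l.foldl (fun d p => pvBump d p.1 p.2) d).getD x 0
      = d.getD x 0 + ((l.filter (fun p => p.1 == x)).map Prod.snd).sum := by
  induction l generalizing d with
  | nil => simp
  | cons a l ih =>
    rw [List.foldl_cons, ih, pvBump_getD]
    by_cases hax : a.1 = x
    · simp [hax]; ring
    · simp [hax, Ne.symm hax]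

theorem pvGood_fold_bump (l : List (String × Int)) (d : PySem.Dict String Int) (h : pvGood d) :
    pvGood (l.foldl (fun d p => pvBump d p.1 p.2) d) := by
  induction l generalizing d with
  | nil => exact h
  | cons a l ih => exact ih _ (pvGood_bump _ _ _ h)

theorem pvAssoc_sum_eq_find? (l : List (String × Int)) (hn : (l.map Prod.fst).Nodup) (x : String) :
    ((l.filter (fun p => p.1 == x)).map Prod.snd).sum
      = ((l.find? (fun p => p.1 == x)).map Prod.snd).getD 0 := by
  induction l with
  | nil => rfl
  | cons a l ih =>
    simp only [List.map_cons, List.nodup_cons] at hn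
    by_cases hax : a.1 = x
    · have hnil : l.filter (fun p => p.1 == x) = [] := by
        rw [List.filter_eq_nil_iff]
        intro p hp hpx
        exact hn.1 (by rw [hax, ← (by simpa using hpx : p.1 = x)]; exact List.mem_map_of_mem hp)
      simp [hax, hnil]
    · have hbeq : (a.1 == x) = false := by simpa using hax
      simp [hbeq, ih hn.2]

theorem pvAssoc_sum_eq_getD (d : PySem.Dict String Int) (h : pvGood d) (x : String) :
    ((d.items.filter (fun p => p.1 == x)).map Prod.snd).sum = d.getD x 0 := by
  have hn : (d.items.map Prod.fst).Nodup := h.1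
  simp only [PySem.Dict.getD, PySem.Dict.get?]
  rw [pvAssoc_sum_eq_find? d.items hn x]

theorem pvMerge_getD (d s : PySem.Dict String Int) (hs : pvGood s) (x : String) :
    (pvMerge d s).getD x 0 = d.getD x 0 + s.getD x 0 := by
  rw [pvMerge, pvFold_bump_getD, pvAssoc_sum_eq_getD s hs]

theorem pvGood_merge (d s : PySem.Dict String Int) (hd : pvGood d) :
    pvGood (pvMerge d s) := pvGood_fold_bump _ _ hd

-- B's loop state: the suffix map stays well-formed, the result keys stay unique
theorem pvStateB_cons (p : String × String) (P : List (String × String)) :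
    pvStateB (p :: P) = pvStepB (pvStateB P) p := rfl

theorem pvGood_empty : pvGood PySem.Dict.empty := ⟨by simp [PySem.Dict.keys, PySem.Dict.empty], by simp [PySem.Dict.empty]⟩

theorem pvStateB_inv (P : List (String × String)) :
    pvGood (pvStateB P).1 ∧ (pvStateB P).2.keys.Nodup := by
  induction P with
  | nil =>
    exact ⟨pvGood_empty, by simp [pvStateB, PySem.Dict.keys, PySem.Dict.empty]⟩
  | cons p P ih =>
    rw [pvStateB_cons]
    unfold pvStepB pvAddTerm
    split_ifs with h1 h2 h3
    · exact ⟨pvGood_bump _ _ _ ih.1, ih.2⟩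
    · exact ⟨pvGood_bump _ _ _ ih.1, ih.2⟩
    · exact ⟨ih.1, PySem.Dict.nodup_keys_insert _ _ _ ih.2⟩
    · exact ⟨ih.1, PySem.Dict.nodup_keys_insert _ _ _ ih.2⟩

theorem pvCanonKey_single (var : String) : pvCanonKey [(var, (1 : Int))] := by
  refine ⟨by simp, by simp, rfl⟩

theorem pvGetD_ofList_single (var x : String) :
    (PySem.Dict.ofList [(var, (1 : Int))]).getD x 0 = if x = var then 1 else 0 := by
  by_cases hx : x = var
  · simp [PySem.Dict.ofList, PySem.Dict.update, PySem.Dict.getD, PySem.Dict.get?,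
      PySem.Dict.insert, PySem.Dict.empty, PySem.Dict.contains, hx]
  · simp [PySem.Dict.ofList, PySem.Dict.update, PySem.Dict.getD, PySem.Dict.get?,
      PySem.Dict.insert, PySem.Dict.empty, PySem.Dict.contains, hx, Ne.symm hx]

-- pushing a key through a bumped exponent dict commutes with bumping the suffix map
theorem pvPush_bump (k : List (String × Int)) (hk : pvCanonKey k) (s : PySem.Dict String Int)
    (hs : pvGood s) (var : String) (δ : Int) :
    pvCanon (pvMerge (PySem.Dict.ofList (pvCanon (pvBump (PySem.Dict.ofList k) var δ))) s)
      = pvCanon (pvMerge (PySem.Dict.ofList k) (pvBump s var δ)) := by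
  have hgk := pvGood_ofList_of_canonKey k hk
  have hgb := pvGood_bump (PySem.Dict.ofList k) var δ hgk
  apply pvCanon_congr
  · exact pvGood_merge _ _ (pvGood_ofList_canon _ hgb)
  · exact pvGood_merge _ _ hgk
  · intro x
    rw [pvMerge_getD _ _ hs, pvMerge_getD _ _ (pvGood_bump _ _ _ hs),
      pvGetD_ofList_canon _ hgb, pvBump_getD, pvBump_getD]
    ring

theorem pvPush_single (var : String) (s : PySem.Dict String Int) (hs : pvGood s) :
    pvCanon (pvMerge (PySem.Dict.ofList [(var, (1 : Int))]) s) = pvCanon (pvBump s var 1) := by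
  apply pvCanon_congr
  · exact pvGood_merge _ _ (pvGood_ofList_of_canonKey _ (pvCanonKey_single var))
  · exact pvGood_bump _ _ _ hs
  · intro x
    rw [pvMerge_getD _ _ hs, pvGetD_ofList_single, pvBump_getD]
    by_cases hx : x = var
    · simp [hx]; omega
    · simp [hx]

theorem pvPush_nil (k : List (String × Int)) (hk : pvCanonKey k) : pvPush k [] = k := by
  unfold pvPush pvMerge
  have : (pvStateB []).1.items = [] := rfl
  rw [this]
  exact pvCanon_ofList_of_canonKey k hk

theorem pvWsum_append {κ : Type} (c : κ → Int) (l l' : List (κ × Int)) :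
    pvWsum c (l ++ l') = pvWsum c l + pvWsum c l' := by
  simp [pvWsum]

theorem pvWsum_congr {κ : Type} (c c' : κ → Int) (l : List (κ × Int))
    (h : ∀ p ∈ l, c p.1 = c' p.1) : pvWsum c l = pvWsum c' l := by
  unfold pvWsum
  congr 1
  exact List.map_congr_left (fun p hp => by rw [h p hp])

theorem pvMap_replace_of_not_mem {κ : Type} [BEq κ] [LawfulBEq κ] (l : List (κ × Int)) (k : κ)
    (v : Int) (h : k ∉ l.map Prod.fst) :
    l.map (fun p => if p.1 == k then (k, v) else p) = l := by
  induction l with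
  | nil => rfl
  | cons a l ih =>
    simp only [List.map_cons, List.mem_cons, not_or] at h
    have : (a.1 == k) = false := by
      simp only [beq_eq_false_iff_ne, ne_eq]
      exact fun he => h.1 he.symm
    simp [this, ih h.2]

theorem pvWsum_replace {κ : Type} [BEq κ] [LawfulBEq κ] (c : κ → Int) (l : List (κ × Int))
    (k : κ) (v : Int) (hn : (l.map Prod.fst).Nodup) (hk : k ∈ l.map Prod.fst) :
    pvWsum c (l.map (fun p => if p.1 == k then (k, v) else p))
      = pvWsum c l + c k * (v - ((l.find? (fun p => p.1 == k)).map Prod.snd).getD 0) := by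
  induction l with
  | nil => simp at hk
  | cons a l ih =>
    simp only [List.map_cons, List.nodup_cons] at hn
    by_cases hak : a.1 = k
    · have hb : (a.1 == k) = true := by simpa using hak
      rw [List.map_cons, if_pos hb, pvMap_replace_of_not_mem l k v (hak ▸ hn.1),
        List.find?_cons_of_pos (p := fun p => p.1 == k) (a := a) hb]
      simp only [pvWsum, List.map_cons, List.sum_cons, Option.map_some, Option.getD_some, hak]
      ring
    · have hb : (a.1 == k) = false := by simpa using hak
      have hk' : k ∈ l.map Prod.fst := by
        rcases (by simpa using hk : k = a.1 ∨ k ∈ l.map Prod.fst) with h | h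
        · exact absurd h.symm hak
        · exact h
      rw [List.map_cons, List.find?_cons_of_neg (p := fun p => p.1 == k) (a := a) (by simp [hb])]
      simp only [pvWsum, List.map_cons, List.sum_cons, hb, Bool.false_eq_true, if_false] at ih ⊢
      rw [ih hn.2 hk']
      ring

theorem pvWsum_insert {κ : Type} [BEq κ] [LawfulBEq κ] (c : κ → Int)
    (m : PySem.Dict κ Int) (k : κ) (v : Int) (hn : m.keys.Nodup) :
    pvWsum c (m.insert k v).items = pvWsum c m.items + c k * (v - m.getD k 0) := by
  by_cases hc : m.contains k = true
  · have hk : k ∈ m.items.map Prod.fst := by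
      have := (PySem.Dict.contains_iff_mem_keys _ _).mp hc
      simpa [PySem.Dict.keys] using this
    rw [PySem.Dict.items_insert_of_contains _ _ hc]
    rw [pvWsum_replace c m.items k v (by simpa [PySem.Dict.keys] using hn) hk]
    simp [PySem.Dict.getD, PySem.Dict.get?]
  · rw [PySem.Dict.items_insert_of_not_contains _ _ (by simpa using hc)]
    rw [pvWsum_append, PySem.Dict.getD_of_not_contains _ _ (by simpa using hc)]
    simp [pvWsum]

theorem pvWsum_group {κ : Type} [BEq κ] [LawfulBEq κ] (c : κ → Int) (g : κ → κ)
    (l : List (κ × Int)) (d : PySem.Dict κ Int) (hn : d.keys.Nodup) :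
    pvWsum c (l.foldl (fun nm p => nm.insert (g p.1) (nm.getD (g p.1) 0 + p.2)) d).items
      = pvWsum c d.items + pvWsum (fun x => c (g x)) l := by
  induction l generalizing d with
  | nil => simp [pvWsum]
  | cons a l ih =>
    rw [List.foldl_cons, ih _ (PySem.Dict.nodup_keys_insert _ _ _ hn),
      pvWsum_insert c d (g a.1) _ hn]
    simp only [pvWsum, List.map_cons, List.sum_cons]
    ring

theorem pvWsum_ind_list {κ : Type} [BEq κ] [LawfulBEq κ] [DecidableEq κ] (K : κ)
    (l : List (κ × Int)) (hn : (l.map Prod.fst).Nodup) :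
    pvWsum (fun k => if k = K then 1 else 0) l
      = ((l.find? (fun p => p.1 == K)).map Prod.snd).getD 0 := by
  induction l with
  | nil => rfl
  | cons a l ih =>
    simp only [List.map_cons, List.nodup_cons] at hn
    by_cases haK : a.1 = K
    · have hb : (a.1 == K) = true := by simpa using haK
      have hnone : l.find? (fun p => p.1 == K) = none := by
        rw [List.find?_eq_none]
        intro p hp hpk
        exact hn.1 (by rw [haK, ← (by simpa using hpk : p.1 = K)]; exact List.mem_map_of_mem hp)
      have hz : pvWsum (fun k => if k = K then 1 else 0) l = 0 := by
        rw [ih hn.2, hnone]; rfl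
      rw [List.find?_cons_of_pos (p := fun p => p.1 == K) (a := a) hb]
      simp only [pvWsum, List.map_cons, List.sum_cons, if_pos haK, one_mul, Option.map_some,
        Option.getD_some]
      simp only [pvWsum] at hz
      omega
    · have hb : (a.1 == K) = false := by simpa using haK
      rw [List.find?_cons_of_neg (p := fun p => p.1 == K) (a := a) (by simp [hb])]
      simp only [pvWsum, List.map_cons, List.sum_cons, if_neg haK, zero_mul, zero_add]
      simpa [pvWsum] using ih hn.2

theorem pvWsum_ind (K : List (String × Int)) (m : PySem.Dict (List (String × Int)) Int)
    (hn : m.keys.Nodup) :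
    pvWsum (fun k => if k = K then 1 else 0) m.items = m.getD K 0 := by
  rw [pvWsum_ind_list K m.items (by simpa [PySem.Dict.keys] using hn)]
  simp [PySem.Dict.getD, PySem.Dict.get?]

-- shapes of A's loop step
theorem pvStepA_mul (m : PySem.Dict (List (String × Int)) Int) (pr : String × String)
    (h : pr.1 = "*" ∨ pr.1 = "/") :
    pvStepA m pr = m.items.foldl (fun nm p =>
      nm.insert (pvCanon (pvBump (PySem.Dict.ofList p.1) pr.2 (if pr.1 = "*" then 1 else -1)))
        (nm.getD (pvCanon (pvBump (PySem.Dict.ofList p.1) pr.2 (if pr.1 = "*" then 1 else -1))) 0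
          + p.2)) PySem.Dict.empty := by
  simp only [pvStepA, if_pos h]

theorem pvStepA_add (m : PySem.Dict (List (String × Int)) Int) (pr : String × String)
    (h : pr.1 = "+" ∨ pr.1 = "-") :
    pvStepA m pr = m.insert [(pr.2, 1)]
      (m.getD [(pr.2, 1)] 0 + (if pr.1 = "+" then 1 else -1)) := by
  have h' : ¬(pr.1 = "*" ∨ pr.1 = "/") := by
    rcases h with h | h <;> simp [h]
  simp only [pvStepA, if_neg h', if_pos h]

-- shapes of B's loop step
theorem pvStateB_mul (pr : String × String) (P : List (String × String))
    (h : pr.1 = "*" ∨ pr.1 = "/") :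
    pvStateB (pr :: P) = (pvBump (pvStateB P).1 pr.2 (if pr.1 = "*" then 1 else -1),
      (pvStateB P).2) := by
  rcases h with h | h <;> simp [pvStateB_cons, pvStepB, h]

theorem pvStateB_add (pr : String × String) (P : List (String × String))
    (h : pr.1 = "+" ∨ pr.1 = "-") :
    pvStateB (pr :: P) = ((pvStateB P).1,
      pvAddTerm (pvStateB P).1 (pvStateB P).2 pr.2 (if pr.1 = "+" then 1 else -1)) := by
  rcases h with h | h <;> simp [pvStateB_cons, pvStepB, h]

-- A's loop keeps keys unique and canonical
def pvInvA (m : PySem.Dict (List (String × Int)) Int) : Prop :=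
  m.keys.Nodup ∧ ∀ k ∈ m.keys, pvCanonKey k

theorem pvInvA_step (m : PySem.Dict (List (String × Int)) Int) (pr : String × String)
    (hm : pvInvA m) (hpr : pr.1 = "*" ∨ pr.1 = "/" ∨ pr.1 = "+" ∨ pr.1 = "-") :
    pvInvA (pvStepA m pr) := by
  rcases (by tauto : (pr.1 = "*" ∨ pr.1 = "/") ∨ (pr.1 = "+" ∨ pr.1 = "-")) with h | h
  · rw [pvStepA_mul m pr h]
    constructor
    · exact PySem.Dict.nodup_keys_foldl_insert_key _ _ _ _ (by simp [PySem.Dict.keys, PySem.Dict.empty])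
    · intro k hk
      rw [PySem.Dict.keys_foldl_insert_key] at hk
      have hk' : k ∈ m.items.map
          (fun p => pvCanon (pvBump (PySem.Dict.ofList p.1) pr.2 (if pr.1 = "*" then 1 else -1))) := by
        have := (PySem.Set.mem_ofList _ _).mp (by simpa [PySem.Dict.keys, PySem.Dict.empty, PySem.Set.update] using hk)
        exact this
      rcases List.mem_map.mp hk' with ⟨p, hp, rfl⟩
      have hck : pvCanonKey p.1 := hm.2 p.1 (PySem.Dict.mem_keys_of_mem_items _ hp)
      exact pvCanonKey_of_good _ (pvGood_bump _ _ _ (pvGood_ofList_of_canonKey _ hck))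
  · rw [pvStepA_add m pr h]
    constructor
    · exact PySem.Dict.nodup_keys_insert _ _ _ hm.1
    · intro k hk
      rcases (PySem.Dict.mem_keys_insert _ _ _ _).mp hk with rfl | hk'
      · exact pvCanonKey_single pr.2
      · exact hm.2 k hk'

theorem pvInvA_fold (P : List (String × String))
    (hP : ∀ p ∈ P, p.1 = "*" ∨ p.1 = "/" ∨ p.1 = "+" ∨ p.1 = "-")
    (m : PySem.Dict (List (String × Int)) Int) (hm : pvInvA m) :
    pvInvA (P.foldl pvStepA m) := by
  induction P generalizing m with
  | nil => exact hm
  | cons pr P ih =>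
    rw [List.foldl_cons]
    exact ih (fun p hp => hP p (List.mem_cons_of_mem _ hp))
      _ (pvInvA_step m pr hm (hP pr List.mem_cons_self))

-- THE MAIN INVARIANT: A's dict after the remaining pairs, looked up at any canonical key K,
-- is the weighted count of m's monomials pushed through the multiplicative suffix, plus B's
-- result dict for those pairs.
theorem pvMain (P : List (String × String))
    (hP : ∀ p ∈ P, p.1 = "*" ∨ p.1 = "/" ∨ p.1 = "+" ∨ p.1 = "-")
    (m : PySem.Dict (List (String × Int)) Int) (hm : pvInvA m) (K : List (String × Int)) :
    (P.foldl pvStepA m).getD K 0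
      = pvWsum (fun k => if pvPush k P = K then 1 else 0) m.items + (pvStateB P).2.getD K 0 := by
  induction P generalizing m with
  | nil =>
    simp only [List.foldl_nil]
    rw [pvWsum_congr _ (fun k => if k = K then 1 else 0) m.items (fun p hp => by
      simp only [pvPush_nil p.1 (hm.2 p.1 (PySem.Dict.mem_keys_of_mem_items _ hp))])]
    rw [pvWsum_ind K m hm.1]
    simp [pvStateB, PySem.Dict.getD, PySem.Dict.get?, PySem.Dict.empty]
  | cons pr P ih =>
    have hP' := fun p hp => hP p (List.mem_cons_of_mem _ hp)
    have hs : pvGood (pvStateB P).1 := (pvStateB_inv P).1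
    rcases (by have := hP pr List.mem_cons_self; tauto :
        (pr.1 = "*" ∨ pr.1 = "/") ∨ (pr.1 = "+" ∨ pr.1 = "-")) with h | h
    · -- multiplicative step
      have hinv' := pvInvA_step m pr hm (hP pr List.mem_cons_self)
      rw [pvStepA_mul m pr h] at hinv'
      rw [List.foldl_cons, pvStepA_mul m pr h, ih hP' _ hinv']
      rw [pvWsum_group (fun k => if pvPush k P = K then 1 else 0)
        (fun k => pvCanon (pvBump (PySem.Dict.ofList k) pr.2 (if pr.1 = "*" then 1 else -1)))
        m.items PySem.Dict.empty (by simp [PySem.Dict.keys, PySem.Dict.empty])]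
      rw [pvStateB_mul pr P h]
      have h2 := pvWsum_congr
        (fun x => if pvPush (pvCanon (pvBump (PySem.Dict.ofList x) pr.2 (if pr.1 = "*" then 1 else -1))) P = K then (1:Int) else 0)
        (fun k => if pvPush k (pr :: P) = K then 1 else 0) m.items (fun p hp => by
          have hck : pvCanonKey p.1 := hm.2 p.1 (PySem.Dict.mem_keys_of_mem_items _ hp)
          have hpush : pvPush (pvCanon (pvBump (PySem.Dict.ofList p.1) pr.2 (if pr.1 = "*" then 1 else -1))) P
              = pvPush p.1 (pr :: P) := by
            unfold pvPush
            rw [pvStateB_mul pr P h]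
            exact pvPush_bump p.1 hck _ hs pr.2 _
          simp only [hpush])
      rw [h2]
      simp [pvWsum, PySem.Dict.empty]
    · -- additive step
      have hinv' := pvInvA_step m pr hm (hP pr List.mem_cons_self)
      rw [pvStepA_add m pr h] at hinv'
      rw [List.foldl_cons, pvStepA_add m pr h, ih hP' _ hinv']
      rw [pvWsum_insert _ _ _ _ hm.1]
      rw [pvStateB_add pr P h]
      have hpushcons : ∀ k : List (String × Int), pvPush k (pr :: P) = pvPush k P := by
        intro k
        unfold pvPush
        rw [pvStateB_add pr P h]
      rw [pvWsum_congr (fun k => if pvPush k P = K then 1 else 0)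
        (fun k => if pvPush k (pr :: P) = K then 1 else 0) m.items
        (fun p _ => by simp only [hpushcons])]
      have hsimp : (m.getD [(pr.2, (1:Int))] 0 + (if pr.1 = "+" then (1:Int) else -1)) - m.getD [(pr.2, 1)] 0
          = (if pr.1 = "+" then (1:Int) else -1) := by ring
      rw [hsimp]
      have hkey : pvPush [(pr.2, (1:Int))] P = pvCanon (pvBump (pvStateB P).1 pr.2 1) := by
        unfold pvPush
        exact pvPush_single pr.2 _ hs
      simp only [pvAddTerm]
      rw [PySem.Dict.getD_insert]
      by_cases hKB : pvCanon (pvBump (pvStateB P).1 pr.2 1) = K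
      · rw [if_pos hKB.symm, if_pos (by rw [hkey]; exact hKB), hKB]
        ring
      · rw [if_neg (fun hh => hKB (hkey ▸ hh)),
          if_neg (c := K = pvCanon (pvBump (pvStateB P).1 pr.2 1)) (fun hh => hKB hh.symm)]
        ring

-- A's output loop is a filter-and-map
theorem pvFoldFilter (l : List ((List (String × Int)) × Int))
    (acc : List (Int × List (String × Int))) :
    l.foldl (fun acc p =>
        if p.2 = 0 then acc else acc ++ [(p.2, PySem.List.sorted p.1 pvPairKey)]) acc
      = acc ++ (l.filter (fun p => !(p.2 == 0))).map
          (fun p => (p.2, PySem.List.sorted p.1 pvPairKey)) := by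
  induction l generalizing acc with
  | nil => simp
  | cons a l ih =>
    by_cases hz : a.2 = 0
    · simp [hz, ih]
    · simp [hz, ih]

-- both ports compute the same value on a tokenized input with valid operators
theorem pvPorts_eq (t0 : String) (rest : List String)
    (hP : ∀ p ∈ pvPairUp rest, p.1 = "*" ∨ p.1 = "/" ∨ p.1 = "+" ∨ p.1 = "-") :
    PySem.List.sorted
      (((pvPairUp rest).foldl pvStepA
          (PySem.Dict.ofList [([(t0, (1 : Int))], (1 : Int))])).items.foldl
        (fun acc p =>
          if p.2 = 0 then acc else acc ++ [(p.2, PySem.List.sorted p.1 pvPairKey)]) []) pvItemKey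
    = PySem.List.sorted
        (((pvAddTerm ((pvPairUp rest).reverse.foldl pvStepB (PySem.Dict.empty, PySem.Dict.empty)).1
              ((pvPairUp rest).reverse.foldl pvStepB (PySem.Dict.empty, PySem.Dict.empty)).2
              t0 1).items.filter (fun p => !(p.2 == 0))).map
          (fun p => (p.2, PySem.List.sorted p.1 pvPairKey))) pvItemKey := by
  set P := pvPairUp rest with hPdef
  have hst : P.reverse.foldl pvStepB (PySem.Dict.empty, PySem.Dict.empty) = pvStateB P := by
    rw [List.foldl_reverse]; rfl
  rw [hst]
  -- the initial dict of A
  have hinit_items : (PySem.Dict.ofList [([(t0, (1 : Int))], (1 : Int))]).items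
      = [([(t0, (1 : Int))], (1 : Int))] := pvOfList_items _ (by simp)
  have hinit_inv : pvInvA (PySem.Dict.ofList [([(t0, (1 : Int))], (1 : Int))]) := by
    constructor
    · simp [PySem.Dict.keys, hinit_items]
    · intro k hk
      simp only [PySem.Dict.keys, hinit_items] at hk
      simp only [List.map_cons, List.map_nil, List.mem_singleton] at hk
      subst hk
      exact pvCanonKey_single t0
  set mfin := P.foldl pvStepA (PySem.Dict.ofList [([(t0, (1 : Int))], (1 : Int))]) with hmfin
  set s := (pvStateB P).1 with hsdef
  set r := (pvStateB P).2 with hrdef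
  have hs : pvGood s := (pvStateB_inv P).1
  have hr : r.keys.Nodup := (pvStateB_inv P).2
  set rB := pvAddTerm s r t0 1 with hrB
  have hkey : pvPush [(t0, (1 : Int))] P = pvCanon (pvBump s t0 1) := pvPush_single t0 s hs
  -- the two final dicts agree on every lookup
  have hEq : ∀ K, mfin.getD K 0 = rB.getD K 0 := by
    intro K
    rw [hmfin, pvMain P hP _ hinit_inv K, hinit_items]
    have hw : pvWsum (fun k => if pvPush k P = K then 1 else 0) [([(t0, (1 : Int))], (1 : Int))]
        = (if pvPush [(t0, (1 : Int))] P = K then 1 else 0) := by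
      simp [pvWsum]
    rw [hw, hrB]
    simp only [pvAddTerm]
    rw [PySem.Dict.getD_insert]
    by_cases hKB : pvCanon (pvBump s t0 1) = K
    · rw [if_pos (hkey.trans hKB), if_pos hKB.symm, hKB]
      ring
    · rw [if_neg (fun hh => hKB (hkey ▸ hh)),
        if_neg (c := K = pvCanon (pvBump s t0 1)) (fun hh => hKB hh.symm)]
      exact zero_add _
  have hmn : mfin.keys.Nodup := (pvInvA_fold P hP _ hinit_inv).1
  have hrn : rB.keys.Nodup := by
    rw [hrB]; simp only [pvAddTerm]
    exact PySem.Dict.nodup_keys_insert _ _ _ hr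
  -- rewrite A's accumulation loop, then compare the two sorted lists via a permutation
  rw [pvFoldFilter, List.nil_append]
  apply PySem.List.sorted_eq_sorted_of_perm _ _ _ pvItemKey_inj
  rw [PySem.Dict.items_eq_map_keys mfin hmn 0, PySem.Dict.items_eq_map_keys rB hrn 0]
  rw [List.filter_map, List.filter_map, List.map_map, List.map_map]
  have hgetmem : ∀ (d : PySem.Dict (List (String × Int)) Int) (k : List (String × Int)),
      d.getD k 0 ≠ 0 → k ∈ d.keys := by
    intro d k hne
    by_contra hk
    have hc : d.contains k = false := by
      cases hcc : d.contains k
      · rfl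
      · exact absurd ((PySem.Dict.contains_iff_mem_keys _ _).mp hcc) hk
    exact hne (PySem.Dict.getD_of_not_contains _ _ hc)
  have hperm : (mfin.keys.filter ((fun p => !(p.2 == 0)) ∘ fun k => (k, mfin.getD k 0))).Perm
      (rB.keys.filter ((fun p => !(p.2 == 0)) ∘ fun k => (k, rB.getD k 0))) := by
    rw [List.perm_ext_iff_of_nodup (hmn.filter _) (hrn.filter _)]
    intro k
    simp only [List.mem_filter, Function.comp_apply]
    constructor
    · rintro ⟨-, hne⟩
      have hne' : ¬rB.getD k 0 = 0 := by rw [← hEq k]; simpa using hne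
      exact ⟨hgetmem rB k hne', by simpa using hne'⟩
    · rintro ⟨-, hne⟩
      have hne' : ¬mfin.getD k 0 = 0 := by rw [hEq k]; simpa using hne
      exact ⟨hgetmem mfin k hne', by simpa using hne'⟩
  have hfun : ((fun p => (p.2, PySem.List.sorted p.1 pvPairKey)) ∘ fun k => (k, mfin.getD k 0))
      = ((fun p => (p.2, PySem.List.sorted p.1 pvPairKey)) ∘ fun k => (k, rB.getD k 0)) := by
    funext k
    simp [hEq k]
  rw [hfun]
  exact hperm.map _

-- ===== VERDICT (by name: the statement is the Claim_ definition above) =====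
theorem pvPairUp_fst (l : List String) (p : String × String) (hp : p ∈ pvPairUp l) :
    ∃ j, 2 * j + 1 < l.length ∧ p.1 = l[2 * j]! := by
  induction l using pvPairUp.induct with
  | case1 a b rest ih =>
    rw [pvPairUp] at hp
    rcases List.mem_cons.mp hp with rfl | hp'
    · exact ⟨0, by simp, by simp⟩
    · obtain ⟨j, hj, heq⟩ := ih hp'
      refine ⟨j + 1, by simp; omega, ?_⟩
      have : 2 * (j + 1) = 2 * j + 1 + 1 := by omega
      rw [this, List.getElem!_cons_succ, List.getElem!_cons_succ]
      exact heq
  | case2 l h =>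
    -- here pvPairUp l = [] (l has fewer than two elements)
    rcases l with _ | ⟨a, _ | ⟨b, rest⟩⟩
    · simp [pvPairUp] at hp
    · simp [pvPairUp] at hp
    · exact absurd rfl (h a b rest)

theorem expr_to_canonical_key_py_spec : Claim_equal_expr_to_canonical_key_py := by
  intro expr _hdom hpre
  unfold Spec_expr_to_canonical_key_py expr_to_canonical_key_py expr_to_canonical_key_py_alt
  unfold Pre_expr_to_canonical_key_py at hpre
  cases htok : pvTokens expr with
  | nil => rfl
  | cons t0 rest =>
    rw [htok] at hpre
    refine pvPorts_eq t0 rest ?_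
    intro p hp
    obtain ⟨j, hj, heq⟩ := pvPairUp_fst rest p hp
    have hlen : 2 * j + 2 < (t0 :: rest).length := by simp; omega
    have := hpre j (by simp; omega) hlen
    have hidx : (t0 :: rest)[2 * j + 1]! = rest[2 * j]! := List.getElem!_cons_succ
    rw [hidx, ← heq] at this
    exact this
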